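-- pv_equiv track=rewrite | github.com/bmskowronek/spatial | datachanger.py | pheno_binarify
-- ===== SOURCE A (Python) =====
-- import bisect
--
-- def pheno_binarify(phenotype):
--      '''
--      in: string 'CD8-CK+GB+Ki67-PD1+PDL1+'
--      out: list sorted alphabetically ['CD8-', 'CK+', 'GB+', 'Ki67-', 'PD1+', 'PDL1+']
--             and then turned into a string of binary characters
--      the genes are sorted to maintain some sort of logic behind their ordering,
--      so that it stays consistent
--
--         last line turns ['CD8-', 'CK+', 'GB+', 'Ki67-', 'PD1+', 'PDL1+']
--         into '011011'
--         elements with - become 0s, + become 1s, it can be consistent due to alphabetical sorting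
--      '''
--      found_genes = []
--      i=0
--      j=0
--      while i<len(phenotype):
--          if phenotype[i] not in '+-':
--              i += 1
--              j += 1
--          else:
--              gene = phenotype[(i-j):i+1]
--              bisect.insort(found_genes, gene) #faster sorting by inserting like this... maybe?
--              j = 0
--              i += 1
--      return ''.join(['0' if '-' in item else '1' for item in found_genes])
-- ===== SOURCE B (Python) =====
-- def pheno_binarify(phenotype):
--     tokens = []
--     name = ''
--     for c in phenotype:
--         if c in '+-':
--             tokens.append(name + c)
--             name = ''
--         else:
--             name += c
--     tokens.sort()
--     return ''.join('1' if t[-1] == '+' else '0' for t in tokens)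
-- ===== Notes on version B (the rewrite author's own statement) =====
-- stated objective: simpler
-- what changed: A scans with manual index/counter state (i, j), extracts each gene by slice arithmetic and keeps the gene list sorted incrementally via bisect.insort; B folds over the characters once accumulating the current name directly, then does a single sort at the end and reads each token's last character for the bit.
import Mathlib
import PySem

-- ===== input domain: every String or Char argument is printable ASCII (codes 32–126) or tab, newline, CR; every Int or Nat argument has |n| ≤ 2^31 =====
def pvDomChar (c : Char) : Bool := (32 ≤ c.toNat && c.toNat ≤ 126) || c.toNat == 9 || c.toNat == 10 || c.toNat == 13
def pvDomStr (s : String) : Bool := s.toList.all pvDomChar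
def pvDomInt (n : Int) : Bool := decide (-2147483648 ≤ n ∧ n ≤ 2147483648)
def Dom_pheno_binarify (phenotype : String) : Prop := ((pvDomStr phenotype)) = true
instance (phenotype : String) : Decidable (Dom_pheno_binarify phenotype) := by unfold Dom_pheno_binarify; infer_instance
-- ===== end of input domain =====

-- B replaces A's manual index/counter scanner with a one-pass tokenizer plus a single
-- final sort (instead of A's slice arithmetic and incremental bisect.insort); objective: simpler.

-- ===== PORT A =====
-- A's while-loop: state (i, j, found_genes); fuel = len(phenotype) - i (i increases by 1
-- each iteration, so the fuel counts the remaining iterations of 'while i < len(phenotype)').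
-- 'phenotype[i] not in "+-"' is the char test; bisect.insort is PySem.List.insertBy with
-- the bisect_right predicate (insert before the first strictly greater element).
def phenoLoopA (s : List Char) : Nat → Int → Int → List (List Char) → List (List Char)
  | 0, _, _, found => found
  | rem + 1, i, j, found =>
    match PySem.List.pyGet? s i with
    | none => found   -- unreachable: the guard keeps 0 ≤ i < len(s)
    | some c =>
      if !(c == '+' || c == '-') then
        phenoLoopA s rem (i + 1) (j + 1) found
      else
        phenoLoopA s rem (i + 1) 0
          (PySem.List.insertBy (fun a b => decide (a < b))
            (PySem.List.slice s (some (i - j)) (some (i + 1))) found)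

def pheno_binarify (phenotype : String) : String :=
  let found := phenoLoopA phenotype.toList phenotype.toList.length 0 0 []
  String.ofList (found.map (fun item => if PySem.Chars.isIn ['-'] item then '0' else '1'))

-- ===== PORT B =====
-- B's for-loop over the characters: state (tokens, name); then tokens.sort() and the join.
def phenoLoopB : List Char → List (List Char) → List Char → List (List Char) × List Char
  | [], tokens, name => (tokens, name)
  | c :: rest, tokens, name =>
    if c == '+' || c == '-' then phenoLoopB rest (tokens ++ [name ++ [c]]) []
    else phenoLoopB rest tokens (name ++ [c])

def pheno_binarify_alt (phenotype : String) : String :=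
  let tokens := (phenoLoopB phenotype.toList [] []).1
  let sortedToks := PySem.List.sorted tokens (fun t => t) false
  String.ofList (sortedToks.map (fun t => if PySem.List.pyGet? t (-1) == some '+' then '1' else '0'))

-- ===== PRECONDITION & SPEC =====
def Spec_pheno_binarify (phenotype : String) (out : String) : Prop := out = pheno_binarify_alt phenotype
instance (phenotype : String) (out : String) : Decidable (Spec_pheno_binarify phenotype out) := by unfold Spec_pheno_binarify; infer_instance

-- ===== CLAIM (what is proved, stated in full; the proofs are below) =====
def Claim_equal_pheno_binarify : Prop := ∀ (phenotype : String), Dom_pheno_binarify phenotype → Spec_pheno_binarify phenotype (pheno_binarify phenotype)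

-- ===== LEMMAS AND PROOFS =====

-- Specification of the tokenizer both programs compute: the maximal sign-terminated
-- segments of the remaining characters, given the pending (sign-free) name `cur`.
def toks : List Char → List Char → List (List Char)
  | [], _ => []
  | c :: rest, cur =>
    if c == '+' || c == '-' then (cur ++ [c]) :: toks rest [] else toks rest (cur ++ [c])

theorem phenoLoopB_fst (rest : List Char) :
    ∀ (tokens : List (List Char)) (name : List Char),
      (phenoLoopB rest tokens name).1 = tokens ++ toks rest name := by
  induction rest with
  | nil => intro tokens name; simp [phenoLoopB, toks]
  | cons c rest ih =>
    intro tokens name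
    by_cases h : (c == '+' || c == '-') = true <;> simp [phenoLoopB, toks, h, ih]

theorem phenoLoopA_eq (rest : List Char) :
    ∀ (pre cur : List Char) (found : List (List Char)) (i j : Int),
      i = (pre.length : Int) + (cur.length : Int) → j = (cur.length : Int) →
      phenoLoopA (pre ++ cur ++ rest) rest.length i j found
      = List.foldl (fun acc t => PySem.List.insertBy (fun a b => decide (a < b)) t acc)
          found (toks rest cur) := by
  induction rest with
  | nil => intro pre cur found i j hi hj; simp [phenoLoopA, toks]
  | cons c rest ih =>
    intro pre cur found i j hi hj
    subst hi hj
    have hcast : ((pre.length : Int) + (cur.length : Int)) = ((pre.length + cur.length : Nat) : Int) := by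
      push_cast; ring
    rw [hcast]
    have hget : PySem.List.pyGet? (pre ++ cur ++ c :: rest)
        ((pre.length + cur.length : Nat) : Int) = some c := by
      rw [PySem.List.pyGet?_natCast]
      rw [show pre ++ cur ++ c :: rest = (pre ++ cur) ++ c :: rest by simp]
      rw [List.getElem?_append_right (by simp)]
      simp
    show phenoLoopA _ (rest.length + 1) _ _ _ = _
    rw [phenoLoopA, hget]
    by_cases h : (c == '+' || c == '-') = true
    · have h1 : (((pre.length + cur.length : Nat) : Int) - (cur.length : Int))
          = ((pre.length : Nat) : Int) := by push_cast; ring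
      have h2 : (((pre.length + cur.length : Nat) : Int) + 1)
          = ((pre.length + cur.length + 1 : Nat) : Int) := by push_cast; ring
      have hslice : PySem.List.slice (pre ++ cur ++ c :: rest)
          (some (((pre.length + cur.length : Nat) : Int) - (cur.length : Int)))
          (some (((pre.length + cur.length : Nat) : Int) + 1)) = cur ++ [c] := by
        rw [h1, h2, PySem.List.slice_natCast]
        rw [show pre ++ cur ++ c :: rest = pre ++ ((cur ++ [c]) ++ rest) by simp]
        rw [show pre.length + cur.length + 1 - pre.length = cur.length + 1 by omega]
        rw [List.drop_left, List.take_left' (by simp)]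
      simp only [h, Bool.not_true, Bool.false_eq_true, if_false]
      rw [hslice]
      rw [show pre ++ cur ++ c :: rest = (pre ++ cur ++ [c]) ++ [] ++ rest by simp]
      rw [ih (pre ++ cur ++ [c]) []
            (PySem.List.insertBy (fun a b => decide (a < b)) (cur ++ [c]) found)
            (((pre.length + cur.length : Nat) : Int) + 1) 0
            (by simp; ring) (by simp)]
      simp [toks, h]
    · simp only [h, Bool.not_false, if_true]
      rw [show pre ++ cur ++ c :: rest = pre ++ (cur ++ [c]) ++ rest by simp]
      rw [ih pre (cur ++ [c]) found
            (((pre.length + cur.length : Nat) : Int) + 1) ((cur.length : Int) + 1)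
            (by simp; omega) (by simp)]
      simp [toks, h]

theorem toks_shape (rest : List Char) :
    ∀ (cur : List Char), (∀ x ∈ cur, (x == '+' || x == '-') = false) →
      ∀ t ∈ toks rest cur, ∃ nm c, t = nm ++ [c] ∧ (c == '+' || c == '-') = true ∧
        ∀ x ∈ nm, (x == '+' || x == '-') = false := by
  induction rest with
  | nil => intro cur _ t ht; simp [toks] at ht
  | cons c rest ih =>
    intro cur hcur t ht
    by_cases h : (c == '+' || c == '-') = true
    · simp only [toks, h, if_true, List.mem_cons] at ht
      rcases ht with rfl | ht
      · exact ⟨cur, c, rfl, h, hcur⟩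
      · exact ih [] (by simp) t ht
    · simp only [toks, h] at ht
      refine ih (cur ++ [c]) ?_ t ht
      intro x hx
      rcases List.mem_append.1 hx with hx | hx
      · exact hcur x hx
      · simp at hx; subst hx; simpa using h

theorem singleton_infix_iff (a : Char) (l : List Char) : [a] <:+: l ↔ a ∈ l := by
  constructor
  · intro h; exact h.sublist.subset (by simp)
  · intro h
    obtain ⟨s, t, rfl⟩ := List.append_of_mem h
    exact ⟨s, t, by simp⟩

theorem pyGet?_neg_one_append (nm : List Char) (c : Char) :
    PySem.List.pyGet? (nm ++ [c]) (-1) = some c := by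
  simp [PySem.List.pyGet?, PySem.List.pyIdx?]

theorem bit_eq (t : List Char)
    (h : ∃ nm c, t = nm ++ [c] ∧ (c == '+' || c == '-') = true ∧
        ∀ x ∈ nm, (x == '+' || x == '-') = false) :
    (if PySem.Chars.isIn ['-'] t then ('0' : Char) else '1')
      = (if PySem.List.pyGet? t (-1) == some '+' then '1' else '0') := by
  obtain ⟨nm, c, rfl, hc, hnm⟩ := h
  rw [pyGet?_neg_one_append]
  rcases Bool.or_eq_true_iff.1 hc with h | h
  · -- c = '+' : no '-' in the token
    have hc' : c = '+' := by simpa using h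
    subst hc'
    have : PySem.Chars.isIn ['-'] (nm ++ ['+']) = false := by
      rw [PySem.Chars.isIn_eq_false_iff]
      intro hinf
      have hm := (singleton_infix_iff _ _).1 hinf
      rcases List.mem_append.1 hm with hm | hm
      · have := hnm _ hm; simp at this
      · simp at hm
    simp [this]
  · -- c = '-' : '-' is in the token, and t[-1] ≠ '+'
    have hc' : c = '-' := by simpa using h
    subst hc'
    have : PySem.Chars.isIn ['-'] (nm ++ ['-']) = true := by
      rw [PySem.Chars.isIn_iff_infix, singleton_infix_iff]; simp
    simp [this]

-- ===== VERDICT (by name: the statement is the Claim_ definition above) =====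
theorem pheno_binarify_spec : Claim_equal_pheno_binarify := by
  intro phenotype _
  show pheno_binarify phenotype = pheno_binarify_alt phenotype
  simp only [pheno_binarify, pheno_binarify_alt]
  rw [phenoLoopB_fst, List.nil_append]
  have hA := phenoLoopA_eq phenotype.toList [] [] [] 0 0 (by simp) (by simp)
  simp only [List.nil_append] at hA
  have hs : PySem.List.sorted (toks phenotype.toList []) (fun t : List Char => t)
      = List.foldl (fun acc x => PySem.List.insertBy (fun a b => decide (a < b)) x acc) []
          (toks phenotype.toList []) :=
    PySem.List.sorted_eq_foldl_insertBy _ _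
  rw [hA, ← hs]
  congr 1
  apply List.map_congr_left
  intro t ht
  have hmem : t ∈ toks phenotype.toList [] :=
    (PySem.List.sorted_perm (toks phenotype.toList []) (fun t => t) false).mem_iff.1 ht
  exact bit_eq t (toks_shape phenotype.toList [] (by simp) t hmem)
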